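-- pv_equiv track=rewrite | github.com/tomcant/advent-of-code | 2025/python/solutions/02/solution.py | part2
-- ===== SOURCE A (Python) =====
-- def part2(input):
--     invalid_id_sum = 0
--
--     for r1, r2 in input:
--         for id in range(r1, r2 + 1):
--             id_str = str(id)
--             id_len = len(id_str)
--
--             for chunk_len in range(1, id_len // 2 + 1):
--                 if id_len % chunk_len != 0:
--                     continue
--
--                 chunks = [
--                     id_str[i : i + chunk_len] for i in range(0, id_len, chunk_len)
--                 ]
--                 if len(set(chunks)) == 1:
--                     invalid_id_sum += id
--                     break
--
--     return invalid_id_sum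
-- ===== SOURCE B (Python) =====
-- def part2(input):
--     return sum(
--         id
--         for r1, r2 in input
--         for id in range(r1, r2 + 1)
--         if _has_repeated_block(str(id))
--     )
--
--
-- def _has_repeated_block(s):
--     # s is a block repeated >= 2 times iff for some divisor c <= len(s)//2
--     # the string equals itself shifted by c: s[c:] == s[:-c].
--     n = len(s)
--     return any(s[c:] == s[:n - c] for c in range(1, n // 2 + 1) if n % c == 0)
-- ===== Notes on version B (the rewrite author's own statement) =====
-- stated objective: simpler
-- what changed: Per id, A builds the list of chunks and compares them through a set; B uses the self-overlap periodicity test s[c:] == s[:-c] for each divisor chunk length and sums matching ids in a single comprehension.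
import Mathlib
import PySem

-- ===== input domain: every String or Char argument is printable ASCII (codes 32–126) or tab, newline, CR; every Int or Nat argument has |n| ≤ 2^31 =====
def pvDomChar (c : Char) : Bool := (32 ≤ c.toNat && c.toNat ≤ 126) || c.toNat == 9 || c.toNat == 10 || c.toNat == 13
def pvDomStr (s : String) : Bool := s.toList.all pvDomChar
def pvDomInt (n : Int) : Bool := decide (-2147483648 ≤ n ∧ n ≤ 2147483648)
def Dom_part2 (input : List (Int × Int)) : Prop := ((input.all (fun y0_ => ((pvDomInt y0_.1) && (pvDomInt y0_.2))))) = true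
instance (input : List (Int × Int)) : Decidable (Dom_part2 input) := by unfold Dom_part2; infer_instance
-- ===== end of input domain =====

-- B replaces A's per-id chunk-list + set-of-chunks comparison by the self-overlap
-- periodicity test s[c:] == s[:-c] and sums via one comprehension (objective: simpler).

-- ===== PORT A =====
-- A's inner 'for chunk_len in range(...)' loop with continue/break; returns true iff some
-- chunk_len splits id_str into identical chunks (the break adds id exactly once).
def pvChunkLoopA (idStr : String) (idLen : Int) (cls : List Int) : Bool :=
  match cls with
  | [] => false
  | c :: rest =>
    if PySem.Int.mod idLen c != 0 then pvChunkLoopA idStr idLen rest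
    else
      let chunks := (PySem.List.pyRange 0 idLen c).map
        (fun i => PySem.Str.slice idStr (some i) (some (i + c)))
      if PySem.Set.len (PySem.Set.ofList chunks) == 1 then true
      else pvChunkLoopA idStr idLen rest

def part2 (input : List (Int × Int)) : Int :=
  input.foldl (fun acc r =>
    (PySem.List.pyRange r.1 (r.2 + 1) 1).foldl (fun acc2 id =>
      let idStr := PySem.Int.toStr id
      let idLen := PySem.Str.len idStr
      if pvChunkLoopA idStr idLen
          (PySem.List.pyRange 1 (PySem.Int.floordiv idLen 2 + 1) 1)
      then acc2 + id else acc2) acc) 0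

-- ===== PORT B =====
def pvHasRepeatedBlock (s : String) : Bool :=
  let n := PySem.Str.len s
  ((PySem.List.pyRange 1 (PySem.Int.floordiv n 2 + 1) 1).filter
      (fun c => PySem.Int.mod n c == 0)).any
    (fun c => PySem.Str.slice s (some c) none == PySem.Str.slice s none (some (n - c)))

def part2_alt (input : List (Int × Int)) : Int :=
  (input.flatMap (fun r =>
    (PySem.List.pyRange r.1 (r.2 + 1) 1).filter
      (fun id => pvHasRepeatedBlock (PySem.Int.toStr id)))).sum

-- ===== PRECONDITION & SPEC =====
def Spec_part2 (input : List (Int × Int)) (out : Int) : Prop := out = part2_alt input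
instance (input : List (Int × Int)) (out : Int) : Decidable (Spec_part2 input out) := by unfold Spec_part2; infer_instance

-- ===== CLAIM (what is proved, stated in full; the proofs are below) =====
def Claim_equal_part2 : Prop := ∀ (input : List (Int × Int)), Dom_part2 input → Spec_part2 input (part2 input)

-- ===== LEMMAS AND PROOFS =====

-- a Python set has one element iff the list it was built from is constant
theorem pv_set_len_one {α : Type} [BEq α] [LawfulBEq α] (x : α) (l : List α) :
    (PySem.Set.ofList (x :: l)).length = 1 ↔ ∀ y ∈ l, y = x := by
  rw [PySem.Set.ofList_cons]
  have h : ((PySem.Set.ofList l).discard x).length = 0 ↔ ∀ y ∈ l, y = x := by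
    rw [List.length_eq_zero_iff, List.eq_nil_iff_forall_not_mem]
    constructor
    · intro h y hy
      by_contra hne
      exact h y ((PySem.Set.mem_discard _ _ _).mpr ⟨(PySem.Set.mem_ofList _ _).mpr hy, hne⟩)
    · intro h y hy
      rcases (PySem.Set.mem_discard _ _ _).mp hy with ⟨h1, h2⟩
      exact h2 (h y ((PySem.Set.mem_ofList _ _).mp h1))
  simpa using h

theorem pv_take_eq_append_iff {α : Type} (t u v : List α) (k : Nat) (ht : t.length = k) :
    u = t ++ v ↔ (u.take k = t ∧ u.drop k = v) := by
  constructor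
  · rintro rfl
    subst ht
    exact ⟨by simp, by simp⟩
  · rintro ⟨h1, h2⟩
    rw [← h1, ← h2, List.take_append_drop]

-- a list splits into identical blocks of size k iff it equals its own shift by k
theorem pv_chunks_all_eq_iff (k : Nat) :
    ∀ (q : Nat) (s : List Char), s.length = k * q →
      ((∀ j, j < q → (s.drop (k*j)).take k = s.take k) ↔
        s.drop k = s.take (s.length - k)) := by
  intro q
  induction q with
  | zero =>
    intro s hs
    have : s = [] := List.length_eq_zero_iff.mp (by omega)
    subst this; simp
  | succ q ih =>
    intro s hs
    have hm : s.length = k * q + k := by rw [hs, Nat.mul_succ]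
    by_cases hq : q = 0
    · subst hq
      constructor
      · intro _
        have h1 : s.drop k = [] := List.drop_eq_nil_of_le (by omega)
        have h2 : s.length - k = 0 := by omega
        simp [h1, h2]
      · intro _ j hj
        interval_cases j
        simp
    · have hq1 : 1 ≤ q := by omega
      have hkq' : k ≤ k * q := by calc k = k * 1 := by ring
                                       _ ≤ k * q := Nat.mul_le_mul_left k hq1
      set t := s.take k with ht
      set u := s.drop k with hu
      have htl : t.length = k := by rw [ht]; simp; omega
      have hul : u.length = k * q := by rw [hu]; simp; omega
      have hst : s = t ++ u := by rw [ht, hu, List.take_append_drop]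
      have hchunk : ∀ j : Nat, (s.drop (k*(j+1))).take k = (u.drop (k*j)).take k := by
        intro j
        rw [hu, List.drop_drop]
        congr 2
        ring
      have hLHS : (∀ j, j < q + 1 → (s.drop (k*j)).take k = s.take k) ↔
          (∀ j, j < q → (u.drop (k*j)).take k = t) := by
        constructor
        · intro h j hj
          rw [← hchunk j]
          exact h (j+1) (by omega)
        · intro h j hj
          match j with
          | 0 => simp
          | j+1 => rw [hchunk j]; exact h j (by omega)
      have hRHS : (s.drop k = s.take (s.length - k)) ↔
          (u.take k = t ∧ u.drop k = u.take (u.length - k)) := by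
        have hlen : s.length - k = k * q := by omega
        have h2 : s.take (s.length - k) = t ++ u.take (k*q - k) := by
          rw [hlen, hst, List.take_append, htl,
              List.take_of_length_le (by rw [htl]; exact hkq')]
        rw [← hu, h2, pv_take_eq_append_iff t u (u.take (k*q - k)) k htl]
        have h3 : u.length - k = k * q - k := by omega
        rw [h3]
      rw [hLHS, hRHS, ← ih u hul]
      constructor
      · intro h
        have h0 : u.take k = t := by
          have h00 := h 0 hq1
          simpa using h00
        exact ⟨h0, fun j hj => (h j hj).trans h0.symm⟩
      · rintro ⟨h0, h⟩ j hj
        exact (h j hj).trans h0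

-- per chunk_len: A's set-of-chunks test equals B's self-overlap test
theorem pv_test_eq (str : String) (c : Int) (h1 : 1 ≤ c)
    (h2 : c ≤ PySem.Int.floordiv (PySem.Str.len str) 2)
    (hdvd : PySem.Int.mod (PySem.Str.len str) c = 0) :
    (PySem.Set.len (PySem.Set.ofList
        ((PySem.List.pyRange 0 (PySem.Str.len str) c).map
          (fun i => PySem.Str.slice str (some i) (some (i + c))))) == 1)
      = (PySem.Str.slice str (some c) none
          == PySem.Str.slice str none (some (PySem.Str.len str - c))) := by
  set s : List Char := str.toList with hsdef
  set m : Nat := s.length with hmdef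
  have hn : PySem.Str.len str = (m : Int) := PySem.Str.len_eq str
  set k : Nat := c.toNat with hkdef
  have hc : c = (k : Int) := by omega
  have hk : 0 < k := by omega
  have h2' : 2 * c ≤ (m : Int) := by
    rw [hn] at h2
    rw [PySem.Int.floordiv_eq_ediv_of_pos (by omega)] at h2
    have := (Int.le_ediv_iff_mul_le (by omega : (0:Int) < 2)).mp h2
    omega
  have hdvd' : k ∣ m := by
    rw [hn] at hdvd
    have hd : c ∣ (m : Int) := (PySem.Int.mod_eq_zero_iff_dvd _ _).mp hdvd
    rw [hc] at hd
    exact_mod_cast hd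
  obtain ⟨q, hmq⟩ := hdvd'
  have hq2 : 2 ≤ q := by
    by_contra hlt
    interval_cases q <;> omega
  have hrange : PySem.List.pyRange 0 (PySem.Str.len str) c
      = (List.range q).map (fun j : Nat => c * (j : Int)) := by
    rw [PySem.List.pyRange_of_pos 0 _ (by omega : (0:Int) < c)]
    have hpos : (0:Int) < PySem.Str.len str := by rw [hn]; exact_mod_cast Nat.pos_of_ne_zero (fun h0 => by omega)
    rw [if_pos hpos]
    have hcount : (PySem.Str.len str - 0 + c - 1) / c = (q : Int) := by
      have hm' : PySem.Str.len str - 0 + c - 1 = (c - 1) + (q : Int) * c := by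
        rw [hn]; push_cast [hmq, hc]; ring
      rw [hm', Int.add_mul_ediv_right _ _ (by omega : c ≠ 0),
          Int.ediv_eq_zero_of_lt (by omega) (by omega)]
      ring
    rw [hcount]
    simp
  rw [hrange]
  have hchunk : ∀ j : Nat,
      (PySem.Str.slice str (some (c * (j:Int))) (some (c * (j:Int) + c))).toList
        = (s.drop (k*j)).take k := by
    intro j
    rw [PySem.Str.toList_slice]
    have e1 : c * (j:Int) = ((k*j : Nat) : Int) := by rw [hc]; push_cast; ring
    rw [e1, hc]
    exact PySem.List.slice_natCast_add s (k*j) k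
  have hlen1 : ∀ (X : PySem.Set String), (PySem.Set.len X == 1) = true ↔ X.length = 1 := by
    intro X
    rw [beq_iff_eq]
    have hX : PySem.Set.len X = (X.length : Int) := rfl
    rw [hX]
    omega
  have hA : ((PySem.Set.len (PySem.Set.ofList
        (((List.range q).map (fun j : Nat => c * (j : Int))).map
          (fun i => PySem.Str.slice str (some i) (some (i + c))))) == 1) = true)
      ↔ (∀ j, j < q → (s.drop (k*j)).take k = s.take k) := by
    rw [List.map_map]
    obtain ⟨q', rfl⟩ : ∃ q', q = q' + 1 := ⟨q - 1, by omega⟩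
    rw [List.range_succ_eq_map, List.map_cons, List.map_map]
    refine (hlen1 _).trans ((pv_set_len_one _ _).trans ?_)
    constructor
    · intro h j hj
      match j with
      | 0 => simp
      | j+1 =>
        have hmem : ((fun i => PySem.Str.slice str (some i) (some (i + c))) ∘
              (fun j : Nat => c * (j : Int)) ∘ Nat.succ) j
            ∈ (List.range q').map (((fun i => PySem.Str.slice str (some i) (some (i + c))) ∘
              (fun j : Nat => c * (j : Int))) ∘ Nat.succ) := by
          exact List.mem_map.mpr ⟨j, List.mem_range.mpr (by omega), rfl⟩
        have heq := h _ hmem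
        have tl := congrArg String.toList heq
        simp only [Function.comp] at tl
        rw [hchunk (Nat.succ j), hchunk 0] at tl
        simpa using tl
    · intro h y hy
      simp only [List.mem_map, List.mem_range, Function.comp] at hy
      obtain ⟨j, hj, rfl⟩ := hy
      apply String.toList_inj.mp
      simp only [Function.comp]
      rw [hchunk (Nat.succ j), hchunk 0]
      have ha := h (Nat.succ j) (by omega)
      have hb := h 0 (by omega)
      simp only [Nat.mul_zero, List.drop_zero] at hb
      rw [ha]
      simp
  have hB : ((PySem.Str.slice str (some c) none
        == PySem.Str.slice str none (some (PySem.Str.len str - c))) = true)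
      ↔ s.drop k = s.take (m - k) := by
    rw [beq_iff_eq, ← String.toList_inj, PySem.Str.toList_slice, PySem.Str.toList_slice]
    show PySem.List.slice s (some c) none = PySem.List.slice s none (some (PySem.Str.len str - c)) ↔ _
    rw [PySem.List.slice_from s (by omega : (0:Int) ≤ c),
        PySem.List.slice_to s (by omega : (0:Int) ≤ PySem.Str.len str - c)]
    have e1 : c.toNat = k := rfl
    have e2 : (PySem.Str.len str - c).toNat = m - k := by omega
    rw [e1, e2]
  rw [Bool.eq_iff_iff, hA, hB]
  have h := pv_chunks_all_eq_iff k q s hmq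
  rw [← hmdef] at h
  exact h

-- A's inner loop over candidate chunk lengths is B's filtered 'any'
theorem pv_loopgen (str : String) (n : Int) (testB : Int → Bool) :
    ∀ (cls : List Int),
      (∀ c ∈ cls, PySem.Int.mod n c = 0 →
        ((PySem.Set.len (PySem.Set.ofList
            ((PySem.List.pyRange 0 n c).map
              (fun i => PySem.Str.slice str (some i) (some (i + c))))) == 1) = testB c)) →
      pvChunkLoopA str n cls
        = (cls.filter (fun c => PySem.Int.mod n c == 0)).any testB := by
  intro cls
  induction cls with
  | nil => intro _; simp [pvChunkLoopA]
  | cons c rest ih =>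
    intro h
    have hrest := ih (fun c' hc' h0 => h c' (List.mem_cons_of_mem _ hc') h0)
    by_cases h0 : PySem.Int.mod n c = 0
    · have hA := h c List.mem_cons_self h0
      rw [pvChunkLoopA]
      simp only [h0, List.filter_cons, List.any_cons, bne_self_eq_false, Bool.false_eq_true,
        if_false, beq_self_eq_true, if_true, hA]
      cases htb : testB c <;> simp [hrest]
    · rw [pvChunkLoopA]
      have hb : (PySem.Int.mod n c != 0) = true := by simpa using h0
      simp only [hb, if_true, List.filter_cons]
      have hb2 : (PySem.Int.mod n c == 0) = false := by simpa using h0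
      rw [hb2]
      simpa using hrest

theorem pv_loop_eq_any (str : String) :
    pvChunkLoopA str (PySem.Str.len str)
      (PySem.List.pyRange 1 (PySem.Int.floordiv (PySem.Str.len str) 2 + 1) 1)
      = pvHasRepeatedBlock str := by
  rw [pvHasRepeatedBlock]
  apply pv_loopgen
  intro c hc h0
  rcases (PySem.List.mem_pyRange_one).mp hc with ⟨hc1, hc2⟩
  exact pv_test_eq str c hc1 (by omega) h0

theorem pv_foldl_if_add (P : Int → Bool) :
    ∀ (l : List Int) (acc : Int),
      l.foldl (fun a x => if P x then a + x else a) acc = acc + (l.filter P).sum := by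
  intro l
  induction l with
  | nil => simp
  | cons x t ih =>
    intro acc
    by_cases h : P x <;> simp [h, ih, add_assoc]

-- ===== VERDICT (by name: the statement is the Claim_ definition above) =====
theorem part2_spec : Claim_equal_part2 := by
  intro input _
  unfold Spec_part2
  have hfun : (fun (acc2 : Int) (id : Int) =>
      let idStr := PySem.Int.toStr id
      let idLen := PySem.Str.len idStr
      if pvChunkLoopA idStr idLen
          (PySem.List.pyRange 1 (PySem.Int.floordiv idLen 2 + 1) 1)
      then acc2 + id else acc2)
      = (fun (acc2 : Int) (id : Int) =>
          if pvHasRepeatedBlock (PySem.Int.toStr id) then acc2 + id else acc2) := by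
    funext acc2 id
    show (if pvChunkLoopA (PySem.Int.toStr id) (PySem.Str.len (PySem.Int.toStr id))
        (PySem.List.pyRange 1
          (PySem.Int.floordiv (PySem.Str.len (PySem.Int.toStr id)) 2 + 1) 1)
      then acc2 + id else acc2) = _
    rw [pv_loop_eq_any]
  have hsum : ∀ (l : List (Int × Int)) (a : Int),
      l.foldl (fun acc r => (PySem.List.pyRange r.1 (r.2 + 1) 1).foldl
        (fun (acc2 : Int) (id : Int) =>
          if pvHasRepeatedBlock (PySem.Int.toStr id) then acc2 + id else acc2) acc) a
      = a + (l.flatMap (fun r => (PySem.List.pyRange r.1 (r.2 + 1) 1).filter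
          (fun id => pvHasRepeatedBlock (PySem.Int.toStr id)))).sum := by
    intro l
    induction l with
    | nil => simp
    | cons r t ih =>
      intro a
      simp only [List.foldl_cons, List.flatMap_cons, List.sum_append]
      rw [pv_foldl_if_add, ih]
      ring
  rw [part2, part2_alt, hfun, hsum input 0]
  ring
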